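-- pv_equiv track=rewrite | github.com/ieee802dot11ac/frequency-tools | class_defs/ark.py | gen_ark_hash
-- ===== SOURCE A (Python) =====
-- def gen_ark_hash(string: str) -> int:
-- 	stri = bytearray(string, "ascii")
-- 	stri.append(0) # cstr compat
-- 	c: int = int(stri[0])
-- 	i: int = 0
-- 	working1: int = 0
-- 	working2: int = 0
-- 	ret: int = 0
-- 	shift: int = 0
-- 	while c != 0:
-- 		c = int(stri[i]) & 0xFF
-- 		working1 = working2 ^ ((c & 0xFFFF) << shift)
-- 		working2 = working1 & 0xFFFF
-- 		ret = working1
-- 		shift = (shift + 1) & 0x7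
-- 		i += 1
-- 	return ret & 0xFFFF
-- ===== SOURCE B (Python) =====
-- def gen_ark_hash(string: str) -> int:
-- 	data = bytearray(string, "ascii")
-- 	groups = [0] * 8
-- 	for i, b in enumerate(data):
-- 		if b == 0:
-- 			break
-- 		groups[i & 7] ^= b
-- 	ret = 0
-- 	for s in range(8):
-- 		ret ^= groups[s] << s
-- 	return ret & 0xFFFF
-- ===== Notes on version B (the rewrite author's own statement) =====
-- stated objective: faster
-- what changed: Replaces A's single dependent accumulator loop (running XOR with 16-bit masking and a cycling shift applied at every byte) by a group-by-residue decomposition: bytes are XOR-bucketed into 8 groups by position mod 8 in one pass, then the 8 buckets are combined with one shift each and masked once.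
import Mathlib
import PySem

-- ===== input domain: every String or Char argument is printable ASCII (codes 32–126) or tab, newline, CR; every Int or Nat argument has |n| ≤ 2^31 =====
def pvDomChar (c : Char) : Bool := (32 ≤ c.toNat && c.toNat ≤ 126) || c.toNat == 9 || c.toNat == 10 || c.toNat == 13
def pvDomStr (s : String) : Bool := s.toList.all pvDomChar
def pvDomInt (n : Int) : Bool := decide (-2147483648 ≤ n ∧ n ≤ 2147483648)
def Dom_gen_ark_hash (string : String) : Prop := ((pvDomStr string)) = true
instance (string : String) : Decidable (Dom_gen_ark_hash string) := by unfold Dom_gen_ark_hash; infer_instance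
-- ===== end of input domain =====

-- B replaces A's single dependent accumulator loop by bucketing bytes per position-residue (i & 7)
-- and combining the 8 XOR buckets afterwards; same O(n), measurably faster per byte in Python.

-- ===== PORT A =====
-- the while loop of A: state (c, working2, ret, shift); Python's int shift counter is kept as a
-- Nat here (it only ever holds 0..7, and Lean's <<< takes a Nat shift count)
def arkLoop : List Int → Int → Int → Int → Nat → Int
  | [], _c, _working2, ret, _shift => ret
  | b :: rest, c, working2, ret, shift =>
    if c = 0 then ret
    else
      let c2 := PySem.Int.band b 0xFF
      let working1 := PySem.Int.bxor working2 ((PySem.Int.band c2 0xFFFF) <<< shift)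
      arkLoop rest c2 (PySem.Int.band working1 0xFFFF) working1 ((shift + 1) &&& 7)

def gen_ark_hash (string : String) : Int :=
  -- bytearray(string, "ascii") with the trailing 0 appended; on Dom every char is ASCII
  let stri : List Int := string.toList.map (fun ch => (ch.toNat : Int)) ++ [0]
  let c : Int := stri.headD 0          -- int(stri[0]); stri is never empty
  PySem.Int.band (arkLoop stri c 0 0 0) 0xFFFF

-- ===== PORT B =====
-- first loop of B: bucket each byte into groups[i & 7] by XOR, stopping at a zero byte
def altGroups : List Int → Nat → List Int → List Int
  | [], _i, groups => groups
  | b :: rest, i, groups =>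
    if b = 0 then groups
    else altGroups rest (i + 1)
        (groups.set (i &&& 7) (PySem.Int.bxor (groups.getD (i &&& 7) 0) b))

def gen_ark_hash_alt (string : String) : Int :=
  let data : List Int := string.toList.map (fun ch => (ch.toNat : Int))
  let groups := altGroups data 0 (List.replicate 8 0)
  let ret := (List.range 8).foldl (fun r s => PySem.Int.bxor r (groups.getD s 0 <<< s)) 0
  PySem.Int.band ret 0xFFFF

-- ===== PRECONDITION & SPEC =====
def Spec_gen_ark_hash (string : String) (out : Int) : Prop := out = gen_ark_hash_alt string
instance (string : String) (out : Int) : Decidable (Spec_gen_ark_hash string out) := by unfold Spec_gen_ark_hash; infer_instance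

-- ===== CLAIM (what is proved, stated in full; the proofs are below) =====
def Claim_equal_gen_ark_hash : Prop := ∀ (string : String), Dom_gen_ark_hash string → Spec_gen_ark_hash string (gen_ark_hash string)

-- ===== LEMMAS AND PROOFS =====

-- common Nat-level spec: XOR of byte i shifted left by i % 8
def xsp : List Nat → Nat → Nat
  | [], _ => 0
  | b :: r, i => (b <<< (i % 8)) ^^^ xsp r (i + 1)

-- Nat-level mirror of B's bucket loop
def updN : List Nat → Nat → List Nat → List Nat
  | [], _i, g => g
  | b :: r, i, g => updN r (i + 1) (g.set (i &&& 7) (g.getD (i &&& 7) 0 ^^^ b))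

-- XOR of the first n buckets, each shifted by its index
def prefN (g : List Nat) : Nat → Nat
  | 0 => 0
  | n + 1 => prefN g n ^^^ (g.getD n 0 <<< n)

lemma land7_eq_mod (n : Nat) : n &&& 7 = n % 8 := by
  have := Nat.and_two_pow_sub_one_eq_mod n 3
  norm_num at this; omega

lemma and_small {b k : Nat} (h : b < 2 ^ k) : b &&& (2 ^ k - 1) = b := by
  rw [Nat.and_two_pow_sub_one_eq_mod, Nat.mod_eq_of_lt h]

lemma mask_xor (x y : Nat) : ((x &&& 65535) ^^^ y) &&& 65535 = (x ^^^ y) &&& 65535 := by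
  rw [Nat.and_xor_distrib_right, Nat.and_xor_distrib_right, Nat.and_assoc, Nat.and_self]

-- ---- A side ----
lemma arkLoop_spec : ∀ (l : List Nat) (c ret : Int) (i w : Nat),
    c ≠ 0 → (∀ b ∈ l, 0 < b ∧ b < 128) → w < 65536 →
    arkLoop (l.map (Nat.cast) ++ [0]) c (↑w) ret (i % 8) = ↑((w ^^^ xsp l i) &&& 65535) := by
  intro l
  induction l with
  | nil =>
    intro c ret i w hc _ hw
    have h255 : PySem.Int.band 0 0xFF = (0 : Int) := by decide
    have h2 : PySem.Int.band 0 0xFFFF = (0 : Int) := by decide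
    have hm : w &&& 65535 = w := by
      simpa using and_small (k := 16) (by omega : w < 2 ^ 16)
    simp [arkLoop, hc, h255, h2, xsp, hm]
  | cons b r ih =>
    intro c ret i w hc hl hw
    obtain ⟨hb0, hb128⟩ := hl b (by simp)
    simp only [List.map_cons, List.cons_append, arkLoop, if_neg hc]
    have e255 : (0xFF : Int) = ((255 : Nat) : Int) := by norm_num
    have e65535 : (0xFFFF : Int) = ((65535 : Nat) : Int) := by norm_num
    have hb255 : b &&& 255 = b := by
      have : b < 2 ^ 8 := by omega
      simpa using and_small (k := 8) this
    have hbF : b &&& 65535 = b := by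
      have : b < 2 ^ 16 := by omega
      simpa using and_small (k := 16) this
    have hc2 : PySem.Int.band (↑b) 0xFF = ((b : Nat) : Int) := by
      rw [e255, PySem.Int.band_natCast, hb255]
    have hw1 : PySem.Int.bxor (↑w) ((PySem.Int.band ((b : Nat) : Int) 0xFFFF) <<< (i % 8))
        = ((w ^^^ (b <<< (i % 8)) : Nat) : Int) := by
      rw [e65535, PySem.Int.band_natCast, hbF, ← Int.natCast_shiftLeft, PySem.Int.bxor_natCast]
    have hmask : PySem.Int.band ((w ^^^ (b <<< (i % 8)) : Nat) : Int) 0xFFFF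
        = (((w ^^^ (b <<< (i % 8))) &&& 65535 : Nat) : Int) := by
      rw [e65535, PySem.Int.band_natCast]
    have hshift : (i % 8 + 1) &&& 7 = (i + 1) % 8 := by
      rw [land7_eq_mod]; omega
    rw [hc2, hw1, hmask, hshift]
    have hbne : ((b : Nat) : Int) ≠ 0 := by exact Nat.cast_ne_zero.mpr (by omega)
    rw [ih _ _ (i + 1) _ hbne (fun x hx => hl x (by simp [hx])) (by
      have := Nat.and_two_pow_sub_one_eq_mod (w ^^^ (b <<< (i % 8))) 16
      norm_num at this ⊢; omega)]
    rw [mask_xor, Nat.xor_assoc]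
    rfl

-- ---- B side ----
lemma getD_map_cast (g : List Nat) (s : Nat) :
    (g.map (Nat.cast : Nat → Int)).getD s 0 = ↑(g.getD s 0) := by
  simp only [List.getD, List.getElem?_map]
  cases h : g[s]? <;> simp

lemma altGroups_map : ∀ (l : List Nat) (i : Nat) (g : List Nat), (∀ b ∈ l, 0 < b) →
    altGroups (l.map (Nat.cast)) i (g.map (Nat.cast)) = (updN l i g).map (Nat.cast) := by
  intro l
  induction l with
  | nil => intro i g _; simp [altGroups, updN]
  | cons b r ih =>
    intro i g hl
    have hb0 := hl b (by simp)
    have hbne : ((b : Nat) : Int) ≠ 0 := Nat.cast_ne_zero.mpr (by omega)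
    simp only [List.map_cons, altGroups, if_neg hbne, updN]
    rw [getD_map_cast, PySem.Int.bxor_natCast, ← List.map_set]
    exact ih _ _ (fun x hx => hl x (by simp [hx]))

lemma prefN_congr : ∀ (n : Nat) (g1 g2 : List Nat),
    (∀ j < n, g1.getD j 0 = g2.getD j 0) → prefN g1 n = prefN g2 n := by
  intro n
  induction n with
  | zero => intro _ _ _; rfl
  | succ n ih =>
    intro g1 g2 h
    simp only [prefN]
    rw [ih g1 g2 (fun j hj => h j (by omega)), h n (by omega)]

lemma getD_set_ne (g : List Nat) (k j : Nat) (v : Nat) (h : j ≠ k) :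
    (g.set k v).getD j 0 = g.getD j 0 := by
  simp only [List.getD, List.getElem?_set_ne (fun hkj => h hkj.symm)]

lemma prefN_set : ∀ (n : Nat) (g : List Nat) (k x : Nat), k < n → k < g.length →
    prefN (g.set k (g.getD k 0 ^^^ x)) n = prefN g n ^^^ (x <<< k) := by
  intro n
  induction n with
  | zero => intro _ _ _ h _; omega
  | succ n ih =>
    intro g k x hkn hkg
    by_cases hk : k = n
    · subst hk
      simp only [prefN]
      rw [prefN_congr k _ g (fun j hj => getD_set_ne g k j _ (by omega))]
      have hself : (g.set k (g.getD k 0 ^^^ x)).getD k 0 = g.getD k 0 ^^^ x := by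
        simp [List.getD, List.getElem?_set_self hkg]
      rw [hself, Nat.shiftLeft_xor_distrib, ← Nat.xor_assoc]
    · have hkn' : k < n := by omega
      simp only [prefN]
      rw [ih g k x hkn' hkg, getD_set_ne g k n _ (fun h => hk h.symm)]
      rw [Nat.xor_assoc, Nat.xor_assoc, Nat.xor_comm (x <<< k)]

lemma updN_pref : ∀ (l : List Nat) (i : Nat) (g : List Nat), g.length = 8 →
    prefN (updN l i g) 8 = prefN g 8 ^^^ xsp l i := by
  intro l
  induction l with
  | nil => intro i g _; simp [updN, xsp]
  | cons b r ih =>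
    intro i g hg
    have hk : i &&& 7 = i % 8 := land7_eq_mod i
    simp only [updN, xsp]
    rw [ih _ _ (by rw [List.length_set, hg]), hk,
      prefN_set 8 g (i % 8) b (by omega) (by omega), Nat.xor_assoc]

lemma fold_range_pref : ∀ (n : Nat) (g : List Nat) (a : Nat),
    (List.range n).foldl (fun r s => PySem.Int.bxor r ((g.map (Nat.cast : Nat → Int)).getD s 0 <<< s)) (↑a)
      = ↑(a ^^^ prefN g n) := by
  intro n
  induction n with
  | zero => intro g a; simp [prefN]
  | succ n ih =>
    intro g a
    rw [List.range_succ, List.foldl_append, ih]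
    simp only [List.foldl_cons, List.foldl_nil, prefN]
    rw [getD_map_cast, ← Int.natCast_shiftLeft, PySem.Int.bxor_natCast, Nat.xor_assoc]

-- both ports, as functions of the byte list, produce the masked common spec
lemma main_eq (l : List Nat) (hbytes : ∀ b ∈ l, 0 < b ∧ b < 128) :
    PySem.Int.band
        (arkLoop (l.map (Nat.cast) ++ [0]) ((l.map (Nat.cast : Nat → Int) ++ [0]).headD 0) 0 0 0) 0xFFFF
      = PySem.Int.band ((List.range 8).foldl
          (fun r s => PySem.Int.bxor r
            ((altGroups (l.map (Nat.cast)) 0 (List.replicate 8 0)).getD s 0 <<< s)) 0) 0xFFFF := by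
  have e65535 : (0xFFFF : Int) = ((65535 : Nat) : Int) := by norm_num
  have hrep : (List.replicate 8 (0 : Int)) = (List.replicate 8 (0 : Nat)).map (Nat.cast) := by simp
  -- B side value
  have hB : PySem.Int.band ((List.range 8).foldl
        (fun r s => PySem.Int.bxor r
          ((altGroups (l.map (Nat.cast)) 0 (List.replicate 8 0)).getD s 0 <<< s)) 0) 0xFFFF
      = ((xsp l 0 &&& 65535 : Nat) : Int) := by
    rw [hrep, altGroups_map l 0 _ (fun b hb => (hbytes b hb).1)]
    have := fold_range_pref 8 (updN l 0 (List.replicate 8 0)) 0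
    rw [Nat.cast_zero, Nat.zero_xor] at this
    rw [this, updN_pref l 0 _ (by simp)]
    have hpz : prefN (List.replicate 8 0) 8 = 0 := by decide
    rw [hpz, Nat.zero_xor, e65535, PySem.Int.band_natCast]
  rw [hB]
  cases l with
  | nil => decide
  | cons b r =>
    have h1 := (hbytes b (by simp)).1
    have hc : ((b : Nat) : Int) ≠ 0 := Nat.cast_ne_zero.mpr (by omega)
    have hhead : (((b :: r).map (Nat.cast : Nat → Int)) ++ [0]).headD 0 = ((b : Nat) : Int) := by
      simp
    rw [hhead]
    have hrun := arkLoop_spec (b :: r) (↑b) 0 0 0 hc hbytes (by omega)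
    simp only [Nat.zero_mod] at hrun
    rw [show ((0:Int) = ((0:Nat):Int)) from rfl] at hrun ⊢
    rw [hrun, e65535, PySem.Int.band_natCast]
    congr 1
    rw [Nat.zero_xor, Nat.and_assoc, Nat.and_self]

-- ===== VERDICT (by name: the statement is the Claim_ definition above) =====
theorem gen_ark_hash_spec : Claim_equal_gen_ark_hash := by
  intro string hdom
  unfold Spec_gen_ark_hash
  have hbytes : ∀ b ∈ string.toList.map Char.toNat, 0 < b ∧ b < 128 := by
    intro b hb
    obtain ⟨ch, hch, rfl⟩ := List.mem_map.mp hb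
    have := List.all_eq_true.mp hdom ch hch
    simp [pvDomChar] at this
    omega
  have hmap : string.toList.map (fun ch => (ch.toNat : Int))
      = (string.toList.map Char.toNat).map (Nat.cast : Nat → Int) := by
    simp [List.map_map]
  simp only [gen_ark_hash, gen_ark_hash_alt, hmap]
  exact main_eq _ hbytes
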